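-- pv_equiv track=rewrite | github.com/jgonzati/python_diplomado_iot | Clase4/1-PostClase.py | cliente_que_mas_pago
-- ===== SOURCE A (Python) =====
-- def cliente_que_mas_pago(itemes, productos, clientes, ventas):
--     #generar lista de venta por boleta
--     cant_boletas = ventas[-1][0] #cant de boletas
--     n_prod = len(productos)
--     i = 1
--     lista = []  #lista de boleta, valor compra
--     #ciclo de boletas
--     while i <= cant_boletas:
--         suma = 0
--         #sumas compras a la boleta
--         for num_boleta, id_prod, cant in itemes:
--             if i == num_boleta:
--                 j = 0
--                 while j < n_prod:
--                     if id_prod in productos[j]: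
--                         suma += cant*productos[j][2]
--                     j += 1
--         lista.append((i, suma))
--         i += 1
--
--     lista_clientes = [] #valor, nombre
--     i = 0
--     while i < cant_boletas:
--         lista_clientes.append((lista[i][1], ventas[i][2]))
--         i += 1
--     lista = []
--     for rut, nombre in clientes:
--         suma = 0
--         for valor, rut_cliente in lista_clientes:
--             if rut == rut_cliente:
--                 suma += valor
--         lista.append((suma, nombre))
--     mayor = 0
--     pos = 0
--     for valor,name in lista:
--         if valor > mayor:
--             mayor = valor
--             nombre = name
--     return nombre
-- ===== SOURCE B (Python) =====
-- def cliente_que_mas_pago(itemes, productos, clientes, ventas):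
--     cant_boletas = ventas[-1][0]
--     # total per boleta in one pass over the items; unit prices are looked up
--     # once per distinct product (a catalogue row mentioning the product
--     # contributes its third field) and memoized
--     precio = {}
--     total_boleta = {}
--     for num_boleta, id_prod, cant in itemes:
--         if 1 <= num_boleta <= cant_boletas:
--             if id_prod not in precio:
--                 precio[id_prod] = sum(fila[2] for fila in productos if id_prod in fila)
--             total_boleta[num_boleta] = total_boleta.get(num_boleta, 0) + cant * precio[id_prod]
--     # total per client rut in one pass over the boletas
--     total_rut = {}
--     for i in range(cant_boletas):
--         rut = ventas[i][2]
--         total_rut[rut] = total_rut.get(rut, 0) + total_boleta.get(i + 1, 0)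
--     # first client whose total strictly beats all earlier ones and 0;
--     # if nobody paid a positive amount, the last listed client
--     mayor, nombre = 0, clientes[-1][1]
--     for rut, name in clientes:
--         if total_rut.get(rut, 0) > mayor:
--             mayor, nombre = total_rut.get(rut, 0), name
--     return nombre
-- ===== Notes on version B (the rewrite author's own statement) =====
-- stated objective: alternative
-- what changed: A rescans the whole product catalogue for every item of every boleta and rescans all boletas for every client (nested loops); B prices each distinct product once (memoized), totals the boletas in one pass over the items, totals the clients in one pass over the boletas, and scans the clients once. Pre_ excludes exactly the inputs where A raises (empty/short ventas or clientes, or a catalogue row shorter than 3 that matches an in-range item).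
import Mathlib
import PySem

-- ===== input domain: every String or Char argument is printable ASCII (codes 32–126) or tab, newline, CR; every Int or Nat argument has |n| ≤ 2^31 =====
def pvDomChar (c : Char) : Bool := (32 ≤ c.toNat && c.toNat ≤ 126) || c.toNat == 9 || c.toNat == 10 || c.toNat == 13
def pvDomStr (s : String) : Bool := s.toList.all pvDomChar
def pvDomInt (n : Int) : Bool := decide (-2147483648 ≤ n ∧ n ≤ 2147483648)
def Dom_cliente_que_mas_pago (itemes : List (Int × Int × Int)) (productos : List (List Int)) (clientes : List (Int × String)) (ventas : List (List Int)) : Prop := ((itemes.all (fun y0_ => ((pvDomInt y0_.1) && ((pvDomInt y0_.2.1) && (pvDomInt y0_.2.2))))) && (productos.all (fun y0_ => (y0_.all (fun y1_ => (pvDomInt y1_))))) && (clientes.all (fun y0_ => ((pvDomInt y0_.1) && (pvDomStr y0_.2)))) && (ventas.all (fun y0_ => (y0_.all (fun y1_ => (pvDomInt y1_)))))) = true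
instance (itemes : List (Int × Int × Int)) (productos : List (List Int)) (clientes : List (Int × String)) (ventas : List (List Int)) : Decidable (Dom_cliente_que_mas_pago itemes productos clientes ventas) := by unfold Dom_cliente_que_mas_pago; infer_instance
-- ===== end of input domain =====

-- B replaces A's nested rescans (catalogue per item per boleta, boletas per client) by
-- memoized per-product pricing and single-pass dictionary aggregation.

-- ===== PORT A =====
-- the inner 'while j < n_prod' scan over the catalogue rows (structural traversal of productos)
def pvRowStep (id_prod cant : Int) (suma : Int) (fila : List Int) : Int :=
  if id_prod ∈ fila then suma + cant * PySem.List.pyGetD fila 2 0 else suma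

-- 'suma' of the boleta-i iteration of the first while loop
def pvBoletaSumA (itemes : List (Int × Int × Int)) (productos : List (List Int)) (i : Int) : Int :=
  itemes.foldl (fun suma it =>
    if i == it.1 then productos.foldl (pvRowStep it.2.1 it.2.2) suma else suma) 0

-- 'lista' after the first while loop (i runs 1,…,cant_boletas)
def pvListaA (itemes : List (Int × Int × Int)) (productos : List (List Int)) (cant : Int) : List (Int × Int) :=
  (PySem.List.pyRange 1 (cant + 1) 1).map (fun i => (i, pvBoletaSumA itemes productos i))

-- 'lista_clientes' (valor, rut) after the second while loop (i runs 0,…,cant_boletas-1)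
def pvListaClientesA (itemes : List (Int × Int × Int)) (productos : List (List Int)) (ventas : List (List Int)) (cant : Int) : List (Int × Int) :=
  (PySem.List.pyRange 0 cant 1).map (fun i =>
    ((PySem.List.pyGetD (pvListaA itemes productos cant) i (0, 0)).2,
     PySem.List.pyGetD (PySem.List.pyGetD ventas i []) 2 0))

-- 'suma' of one client's iteration of the 'for rut, nombre in clientes' loop
def pvClientSumA (lc : List (Int × Int)) (rut : Int) : Int :=
  lc.foldl (fun suma vc => if rut == vc.2 then suma + vc.1 else suma) 0

def cliente_que_mas_pago (itemes : List (Int × Int × Int)) (productos : List (List Int)) (clientes : List (Int × String)) (ventas : List (List Int)) : String :=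
  -- cant_boletas = ventas[-1][0]; final scan starts with mayor = 0 and 'nombre' still holding
  -- the last client's name (leftover variable of the previous for loop)
  ((clientes.map (fun c =>
      (pvClientSumA (pvListaClientesA itemes productos ventas
          (PySem.List.pyGetD (PySem.List.pyGetD ventas (-1) []) 0 0)) c.1, c.2))).foldl
    (fun (st : Int × String) p => if p.1 > st.1 then p else st)
    (0, (PySem.List.pyGetD clientes (-1) (0, "")).2)).2

-- ===== PORT B =====
-- 'sum(fila[2] for fila in productos if id_prod in fila)': the unit price of a product
def pvPrecioOf (productos : List (List Int)) (pid : Int) : Int :=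
  productos.foldl (fun s fila => if pid ∈ fila then s + PySem.List.pyGetD fila 2 0 else s) 0

-- one step of B's single pass over the items: (precio, total_boleta) dictionaries
def pvPassStepB (productos : List (List Int)) (cant : Int)
    (st : PySem.Dict Int Int × PySem.Dict Int Int) (it : Int × Int × Int) :
    PySem.Dict Int Int × PySem.Dict Int Int :=
  if 1 ≤ it.1 ∧ it.1 ≤ cant then
    let pr := if st.1.contains it.2.1 then st.1
              else st.1.insert it.2.1 (pvPrecioOf productos it.2.1)
    (pr, st.2.insert it.1 (st.2.getD it.1 0 + it.2.2 * pr.getD it.2.1 0))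
  else st

-- 'total_boleta' after B's pass over the items
def pvTotalBoletaB (itemes : List (Int × Int × Int)) (productos : List (List Int)) (cant : Int) : PySem.Dict Int Int :=
  (itemes.foldl (pvPassStepB productos cant) (PySem.Dict.empty, PySem.Dict.empty)).2

-- 'total_rut' after B's pass over the boletas
def pvTotalRutB (itemes : List (Int × Int × Int)) (productos : List (List Int)) (ventas : List (List Int)) (cant : Int) : PySem.Dict Int Int :=
  (PySem.List.pyRange 0 cant 1).foldl (fun d i =>
    d.insert (PySem.List.pyGetD (PySem.List.pyGetD ventas i []) 2 0)
      (d.getD (PySem.List.pyGetD (PySem.List.pyGetD ventas i []) 2 0) 0 +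
        (pvTotalBoletaB itemes productos cant).getD (i + 1) 0))
    PySem.Dict.empty

def cliente_que_mas_pago_alt (itemes : List (Int × Int × Int)) (productos : List (List Int)) (clientes : List (Int × String)) (ventas : List (List Int)) : String :=
  (clientes.foldl (fun (st : Int × String) c =>
      if (pvTotalRutB itemes productos ventas
            (PySem.List.pyGetD (PySem.List.pyGetD ventas (-1) []) 0 0)).getD c.1 0 > st.1 then
        ((pvTotalRutB itemes productos ventas
            (PySem.List.pyGetD (PySem.List.pyGetD ventas (-1) []) 0 0)).getD c.1 0, c.2)
      else st)
    (0, (PySem.List.pyGetD clientes (-1) (0, "")).2)).2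

-- ===== PRECONDITION & SPEC =====
-- Pre_ excludes exactly the inputs where the Python A raises: empty ventas or clientes, missing
-- ventas[-1][0], fewer than cant_boletas ventas rows or one of them shorter than 3, and a
-- productos row shorter than 3 that contains the product id of some in-range item
-- (both programs read fila[2] of such a row and raise IndexError).
def Pre_cliente_que_mas_pago (itemes : List (Int × Int × Int)) (productos : List (List Int)) (clientes : List (Int × String)) (ventas : List (List Int)) : Prop :=
  ventas ≠ [] ∧ clientes ≠ [] ∧
  (ventas.getLast?.getD []) ≠ [] ∧
  (let cant := ((ventas.getLast?.getD []).head?.getD 0)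
   cant ≤ (ventas.length : Int) ∧ (∀ row ∈ ventas.take cant.toNat, 3 ≤ row.length) ∧
   (∀ fila ∈ productos, 3 ≤ fila.length ∨
      ∀ it ∈ itemes, 1 ≤ it.1 ∧ it.1 ≤ cant → it.2.1 ∉ fila))

instance (itemes : List (Int × Int × Int)) (productos : List (List Int)) (clientes : List (Int × String)) (ventas : List (List Int)) : Decidable (Pre_cliente_que_mas_pago itemes productos clientes ventas) := by
  unfold Pre_cliente_que_mas_pago; infer_instance

def pvWitness_cliente_que_mas_pago : (List (Int × Int × Int)) × List (List Int) × (List (Int × String)) × List (List Int) :=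
  ([(1, 1, 2)], [[1, 0, 3]], [(7, "ana")], [[1, 0, 7]])

def Spec_cliente_que_mas_pago (itemes : List (Int × Int × Int)) (productos : List (List Int)) (clientes : List (Int × String)) (ventas : List (List Int)) (out : String) : Prop := out = cliente_que_mas_pago_alt itemes productos clientes ventas
instance (itemes : List (Int × Int × Int)) (productos : List (List Int)) (clientes : List (Int × String)) (ventas : List (List Int)) (out : String) : Decidable (Spec_cliente_que_mas_pago itemes productos clientes ventas out) := by unfold Spec_cliente_que_mas_pago; infer_instance

-- ===== CLAIM (what is proved, stated in full; the proofs are below) =====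
def Claim_equal_cliente_que_mas_pago : Prop := ∀ (itemes : List (Int × Int × Int)) (productos : List (List Int)) (clientes : List (Int × String)) (ventas : List (List Int)), Dom_cliente_que_mas_pago itemes productos clientes ventas → Pre_cliente_que_mas_pago itemes productos clientes ventas → Spec_cliente_que_mas_pago itemes productos clientes ventas (cliente_que_mas_pago itemes productos clientes ventas)

-- ===== LEMMAS AND PROOFS =====

-- building a dict by "d[k] = d.get(k,0)+v" over a list equals the corresponding conditional left fold
theorem pv_dict_group {β : Type} (l : List β) (key val : β → Int) (d : PySem.Dict Int Int) (x : Int) (s : Int) (hd : d.getD x 0 = s) :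
    (l.foldl (fun d b => d.insert (key b) (d.getD (key b) 0 + val b)) d).getD x 0
      = l.foldl (fun s b => if x == key b then s + val b else s) s := by
  induction l generalizing d s with
  | nil => simpa using hd
  | cons a t ih =>
      simp only [List.foldl_cons]
      by_cases hx : x = key a
      · rw [ih _ _ (by rw [PySem.Dict.getD_insert, if_pos hx, ← hx, hd])]
        simp [hx]
      · rw [ih _ _ (by rw [PySem.Dict.getD_insert, if_neg hx, hd])]
        simp [hx]

-- an accumulator shift law for B's price fold
theorem pv_shift (idp : Int) (l : List (List Int)) (t : Int) :
    l.foldl (fun s fila => if idp ∈ fila then s + PySem.List.pyGetD fila 2 0 else s) t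
      = t + l.foldl (fun s fila => if idp ∈ fila then s + PySem.List.pyGetD fila 2 0 else s) 0 := by
  induction l generalizing t with
  | nil => simp
  | cons fila rest ih =>
      simp only [List.foldl_cons]
      by_cases hx : idp ∈ fila
      · rw [if_pos hx, if_pos hx, ih, ih (0 + PySem.List.pyGetD fila 2 0)]; ring
      · rw [if_neg hx, if_neg hx]; exact ih t

-- A's catalogue scan for one item = suma + cant * unit price
theorem pv_prodscan (productos : List (List Int)) (idp c : Int) (s : Int) :
    productos.foldl (pvRowStep idp c) s = s + c * pvPrecioOf productos idp := by
  unfold pvPrecioOf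
  induction productos generalizing s with
  | nil => simp
  | cons fila rest ih =>
      simp only [List.foldl_cons, pvRowStep]
      by_cases hx : idp ∈ fila
      · rw [if_pos hx, if_pos hx, ih, pv_shift idp rest (0 + PySem.List.pyGetD fila 2 0)]; ring
      · rw [if_neg hx, if_neg hx, ih]

-- the memoization invariant: every price stored in 'precio' is the catalogue price
def pvInv (productos : List (List Int)) (pr : PySem.Dict Int Int) : Prop :=
  ∀ k v, pr.get? k = some v → v = pvPrecioOf productos k

theorem pv_inv_getD (productos : List (List Int)) (pr : PySem.Dict Int Int) (h : pvInv productos pr) (k : Int) :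
    (if pr.contains k then pr else pr.insert k (pvPrecioOf productos k)).getD k 0 = pvPrecioOf productos k ∧
    pvInv productos (if pr.contains k then pr else pr.insert k (pvPrecioOf productos k)) := by
  by_cases hc : pr.contains k = true
  · rw [if_pos hc]
    refine ⟨?_, h⟩
    rcases hg : pr.get? k with _ | v
    · rw [(PySem.Dict.get?_eq_none_iff_contains pr k).mp hg] at hc; cases hc
    · rw [PySem.Dict.getD_eq_get?_getD, hg, h k v hg]; rfl
  · rw [if_neg hc]
    constructor
    · rw [PySem.Dict.getD_eq_get?_getD, PySem.Dict.get?_insert_self]; rfl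
    · intro k' v hv
      by_cases hk : k' = k
      · subst hk; rw [PySem.Dict.get?_insert_self] at hv; exact (Option.some_inj.mp hv).symm
      · rw [PySem.Dict.get?_insert, if_neg hk] at hv; exact h k' v hv

-- B's single pass: the total_boleta entry of i accumulates exactly the items of boleta i in range
theorem pv_pass_getD (productos : List (List Int)) (cant : Int) (itemes : List (Int × Int × Int))
    (pr tb : PySem.Dict Int Int) (hinv : pvInv productos pr) (i : Int) :
    ((itemes.foldl (pvPassStepB productos cant) (pr, tb)).2).getD i 0
      = itemes.foldl (fun s b =>
          if 1 ≤ b.1 ∧ b.1 ≤ cant then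
            (if i == b.1 then s + b.2.2 * pvPrecioOf productos b.2.1 else s)
          else s) (tb.getD i 0) := by
  induction itemes generalizing pr tb with
  | nil => simp
  | cons a t ih =>
      simp only [List.foldl_cons, pvPassStepB]
      by_cases hr : 1 ≤ a.1 ∧ a.1 ≤ cant
      · rw [if_pos hr, if_pos hr]
        obtain ⟨hval, hinv'⟩ := pv_inv_getD productos pr hinv a.2.1
        rw [ih _ _ hinv']
        congr 1
        rw [hval, PySem.Dict.getD_insert]
        by_cases hi : i = a.1
        · rw [if_pos hi, if_pos (by simp [hi]), hi]
        · rw [if_neg hi, if_neg (by simp [hi])]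
      · rw [if_neg hr, if_neg hr, ih _ _ hinv]

-- stage equality: B's total_boleta at an in-range boleta number = A's boleta sum
theorem pv_boleta_eq (itemes : List (Int × Int × Int)) (productos : List (List Int)) (cant i : Int) (h1 : 1 ≤ i) (h2 : i ≤ cant) :
    (pvTotalBoletaB itemes productos cant).getD i 0 = pvBoletaSumA itemes productos i := by
  unfold pvTotalBoletaB pvBoletaSumA
  rw [pv_pass_getD productos cant itemes PySem.Dict.empty PySem.Dict.empty
      (fun k v hv => by rw [PySem.Dict.get?_empty] at hv; cases hv) i]
  rw [PySem.Dict.getD_empty]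
  refine (PySem.List.foldl_congr_mem _ _ _ _ ?_).symm
  intro s b _
  by_cases hi : i == b.1
  · have hb : i = b.1 := beq_iff_eq.mp hi
    rw [if_pos hi, if_pos (by omega), if_pos hi, pv_prodscan]
  · rw [if_neg hi]
    by_cases hr : 1 ≤ b.1 ∧ b.1 ≤ cant
    · rw [if_pos hr, if_neg hi]
    · rw [if_neg hr]

theorem pv_listaclientes_eq (itemes : List (Int × Int × Int)) (productos : List (List Int)) (ventas : List (List Int)) (cant : Int) :
    pvListaClientesA itemes productos ventas cant
      = (PySem.List.pyRange 0 cant 1).map (fun i =>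
          ((pvTotalBoletaB itemes productos cant).getD (i + 1) 0,
           PySem.List.pyGetD (PySem.List.pyGetD ventas i []) 2 0)) := by
  unfold pvListaClientesA
  apply List.map_congr_left
  intro i hi
  have hb := PySem.List.mem_pyRange_one.mp hi
  have hnat : (i.toNat : Int) = i := Int.toNat_of_nonneg hb.1
  unfold pvListaA
  rw [← hnat, PySem.List.pyGetD_map_pyRange_one (fun j => (j, pvBoletaSumA itemes productos j)) 1 (cant + 1) i.toNat (0, 0) (by omega)]
  rw [← pv_boleta_eq itemes productos cant (1 + (i.toNat : Int)) (by omega) (by omega)]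
  rw [hnat, Int.add_comm 1 i]

theorem pv_client_eq (itemes : List (Int × Int × Int)) (productos : List (List Int)) (ventas : List (List Int)) (cant rut : Int) :
    pvClientSumA (pvListaClientesA itemes productos ventas cant) rut
      = (pvTotalRutB itemes productos ventas cant).getD rut 0 := by
  rw [pv_listaclientes_eq]
  unfold pvClientSumA pvTotalRutB
  rw [List.foldl_map,
    pv_dict_group (PySem.List.pyRange 0 cant 1)
      (fun i => PySem.List.pyGetD (PySem.List.pyGetD ventas i []) 2 0)
      (fun i => (pvTotalBoletaB itemes productos cant).getD (i + 1) 0)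
      PySem.Dict.empty rut 0 (by simp)]

-- ===== VERDICT (by name: the statement is the Claim_ definition above) =====
theorem cliente_que_mas_pago_spec : Claim_equal_cliente_que_mas_pago := by
  intro itemes productos clientes ventas _ _
  unfold Spec_cliente_que_mas_pago cliente_que_mas_pago cliente_que_mas_pago_alt
  rw [List.foldl_map]
  simp only [pv_client_eq]
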